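-- pv_equiv track=rewrite | github.com/icebeartellsnolies/leetcode | site_code/hacker_rank former codewars/max_palindromes.py | query
-- ===== SOURCE A (Python) =====
-- from itertools import permutations
--
-- def query(s,l,r):
--     to_check=s[l-1:r]
--     max_lengths=[]
--     checking=to_check
--     for i in range(len(to_check)):
--         checking_lst=list(to_check)
--         checking_lst.pop(i)
--         checking=''.join(k for k in checking_lst)
--
--         comb=list(permutations(checking,len(checking)))
--
--         for j in comb:
--             reversed_comb=j[::-1]
--             if reversed_comb==j:
--                 string=''.join(k for k in j)
--                 max_lengths.append(string)
--
--     un_duplicated=[]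
--     for i in max_lengths:
--         if i not in un_duplicated:
--             un_duplicated.append(i)
--     return len(un_duplicated)
-- ===== SOURCE B (Python) =====
-- def _fact(n):
--     f = 1
--     for i in range(2, n + 1):
--         f *= i
--     return f
--
-- def query(s, l, r):
--     t = s[l-1:r]
--     counts = {}
--     for ch in t:
--         counts[ch] = counts.get(ch, 0) + 1
--     total = 0
--     for c in counts:
--         rem = [(k, v - 1 if k == c else v) for k, v in counts.items()]
--         odd = 0
--         half = 0
--         for _, v in rem:
--             odd += v % 2
--             half += v // 2
--         if odd <= 1:
--             den = 1
--             for _, v in rem: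
--                 den *= _fact(v // 2)
--             total += _fact(half) // den
--     return total
-- ===== Notes on version B (the rewrite author's own statement) =====
-- stated objective: faster
-- what changed: A enumerates all permutations of the substring with each position removed, filters palindromic ones and deduplicates a huge list; B counts the characters once and, per distinct removed character, adds the closed factorial-quotient count (halves)!/prod((count//2)!) of distinct palindromic arrangements, with no enumeration at all.
import Mathlib
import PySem

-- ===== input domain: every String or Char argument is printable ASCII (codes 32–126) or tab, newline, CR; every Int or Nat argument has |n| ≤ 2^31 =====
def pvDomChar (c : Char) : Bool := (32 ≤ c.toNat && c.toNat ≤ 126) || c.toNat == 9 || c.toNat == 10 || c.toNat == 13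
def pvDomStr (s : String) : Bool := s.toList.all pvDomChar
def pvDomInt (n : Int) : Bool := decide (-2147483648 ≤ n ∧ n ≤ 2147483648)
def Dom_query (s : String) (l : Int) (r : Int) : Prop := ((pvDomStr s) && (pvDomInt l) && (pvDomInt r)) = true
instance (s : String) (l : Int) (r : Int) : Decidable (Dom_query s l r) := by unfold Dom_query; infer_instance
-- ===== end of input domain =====

-- B replaces A's enumeration of all permutations per removed position (filtered for palindromes,
-- deduplicated at the end) by a per-distinct-character multiset removal and the closed
-- factorial-quotient count of distinct palindromic arrangements, summed.

-- ===== PORT A =====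
-- Python string values are represented by their character lists throughout (''.join(k for k in j)
-- builds the string whose characters are exactly j, and string equality ↔ char-list equality),
-- so the membership tests and the final count are identical.
def queryBody (toCheck : List Char) : Int :=
  -- for i in range(len(to_check)): checking_lst.pop(i) with i ∈ range(len) leaves exactly eraseIdx i
  let maxLengths := (List.range toCheck.length).foldl (fun acc i =>
    let checking := toCheck.eraseIdx i
    -- comb = list(permutations(checking, len(checking)))
    let comb := PySem.List.permutations checking checking.length
    -- j[::-1] == j  ⟺  j.reverse = j  (PySem.List.slice?_none_none_neg_one)
    comb.foldl (fun acc2 j => if j.reverse = j then acc2 ++ [j] else acc2) acc) []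
  -- un_duplicated: keep first occurrences
  let unDuplicated := maxLengths.foldl (fun u x => if x ∈ u then u else u ++ [x]) []
  (unDuplicated.length : Int)

def query (s : String) (l : Int) (r : Int) : Int :=
  queryBody ((PySem.Str.slice s (some (l - 1)) (some r)).toList)   -- to_check = s[l-1:r]

-- ===== PORT B =====
def factB (n : Int) : Int :=   -- _fact: f = 1; for i in range(2, n+1): f *= i
  (PySem.List.pyRange 2 (n + 1) 1).foldl (fun f i => f * i) 1

def queryAltBody (t : List Char) : Int :=
  let counts := PySem.Dict.counter t   -- the counting loop (PySem.List.foldl_insert_getD_add_one_eq_counter)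
  counts.keys.foldl (fun total c =>
    let rem := counts.items.map (fun kv => (kv.1, if kv.1 = c then kv.2 - 1 else kv.2))
    let oh := rem.foldl (fun (p : Int × Int) kv =>
      (p.1 + PySem.Int.mod kv.2 2, p.2 + PySem.Int.floordiv kv.2 2)) (0, 0)
    if oh.1 ≤ 1 then
      let den := rem.foldl (fun d kv => d * factB (PySem.Int.floordiv kv.2 2)) 1
      total + PySem.Int.floordiv (factB oh.2) den
    else total) 0

def query_alt (s : String) (l : Int) (r : Int) : Int :=
  queryAltBody ((PySem.Str.slice s (some (l - 1)) (some r)).toList)   -- t = s[l-1:r]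

-- ===== PRECONDITION & SPEC =====
def Spec_query (s : String) (l : Int) (r : Int) (out : Int) : Prop := out = query_alt s l r
instance (s : String) (l : Int) (r : Int) (out : Int) : Decidable (Spec_query s l r out) := by unfold Spec_query; infer_instance

-- ===== CLAIM (what is proved, stated in full; the proofs are below) =====
def Claim_equal_query : Prop := ∀ (s : String) (l : Int) (r : Int), Dom_query s l r → Spec_query s l r (query s l r)

-- ===== LEMMAS AND PROOFS =====

-- Abstract objects both programs are reduced to (proof-only).
def palF (u : List Char) : Finset (List Char) :=
  (u.permutations.filter (fun w => decide (w.reverse = w))).toFinset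

def nPerm (u : List Char) : ℕ := u.permutations.toFinset.card

def oddCnt (u : List Char) : ℕ := ∑ x ∈ u.toFinset, u.count x % 2

def halfLen (u : List Char) : ℕ := ∑ x ∈ u.toFinset, u.count x / 2

def halfList (u : List Char) : List Char :=
  u.dedup.flatMap (fun x => List.replicate (u.count x / 2) x)

def midList (u : List Char) : List Char :=
  u.dedup.filter (fun x => u.count x % 2 = 1)

theorem mem_permutations_of_perm :
    ∀ (n : ℕ) (xs p : List Char), xs.length = n → p.Perm xs →
      p ∈ PySem.List.permutations xs n := by
  intro n
  induction n with
  | zero =>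
    intro xs p hl hp
    have hxs : xs = [] := List.length_eq_zero_iff.mp hl
    subst hxs
    have hp' : p = [] := hp.eq_nil
    simp [PySem.List.permutations_zero, hp']
  | succ n ih =>
    intro xs p hl hp
    cases p with
    | nil =>
      have := hp.length_eq
      simp [hl] at this
    | cons c t =>
      have hmem := List.cons_perm_iff_perm_erase.mp hp
      obtain ⟨hc, ht⟩ := hmem
      rw [PySem.List.permutations_succ]
      refine List.mem_flatMap.mpr ⟨xs.idxOf c, List.mem_range.mpr (List.idxOf_lt_length_of_mem hc), ?_⟩
      have hget : xs[xs.idxOf c]? = some c := by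
        rw [List.getElem?_eq_getElem (List.idxOf_lt_length_of_mem hc)]
        exact congrArg some (List.getElem_idxOf (List.idxOf_lt_length_of_mem hc))
      rw [hget]
      refine List.mem_map.mpr ⟨t, ?_, rfl⟩
      rw [← List.erase_eq_eraseIdx_of_idxOf rfl]
      exact ih _ _ (by rw [List.length_erase_of_mem hc, hl]; omega) ht

theorem mem_permutations_iff (xs p : List Char) :
    p ∈ PySem.List.permutations xs xs.length ↔ p.Perm xs :=
  ⟨PySem.List.perm_of_mem_permutations, mem_permutations_of_perm _ _ _ rfl⟩

theorem pal_reverse_take (w : List Char) (hp : w.reverse = w) (k : ℕ) :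
    (w.take k).reverse = w.drop (w.length - k) := by
  rw [List.reverse_take, hp]

theorem pal_decomp_even (w : List Char) (k : ℕ) (hp : w.reverse = w)
    (hm : w.length = 2 * k) : w = w.take k ++ (w.take k).reverse := by
  conv_lhs => rw [← List.take_append_drop k w]
  congr 1
  rw [pal_reverse_take w hp k]
  congr 1
  omega

theorem pal_decomp_odd (w : List Char) (k : ℕ) (hp : w.reverse = w)
    (hm : w.length = 2 * k + 1) (hk : k < w.length) :
    w = w.take k ++ (w[k] :: (w.take k).reverse) := by
  conv_lhs => rw [← List.take_append_drop k w]
  congr 1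
  rw [List.drop_eq_getElem_cons hk]
  congr 1
  rw [pal_reverse_take w hp k]
  congr 1
  omega

theorem pal_count_even (w : List Char) (k : ℕ) (hp : w.reverse = w)
    (hm : w.length = 2 * k) (x : Char) :
    w.count x = 2 * (w.take k).count x := by
  conv_lhs => rw [pal_decomp_even w k hp hm]
  simp [List.count_append]
  omega

theorem pal_count_odd (w : List Char) (k : ℕ) (hp : w.reverse = w)
    (hm : w.length = 2 * k + 1) (hk : k < w.length) (x : Char) :
    w.count x = 2 * (w.take k).count x + (if x = w[k] then 1 else 0) := by
  conv_lhs => rw [pal_decomp_odd w k hp hm hk]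
  simp [List.count_append, List.count_cons]
  split_ifs with h h' h'
  · omega
  · exact absurd h.symm h'
  · exact absurd h'.symm h
  · omega

theorem pal_count_take_half (w : List Char) (hp : w.reverse = w) (x : Char) :
    (w.take (w.length / 2)).count x = w.count x / 2 := by
  rcases Nat.even_or_odd w.length with ⟨k, hk⟩ | ⟨k, hk⟩
  · have hm : w.length = 2 * k := by omega
    have h2 : w.length / 2 = k := by omega
    rw [h2, pal_count_even w k hp hm]
    omega
  · have hm : w.length = 2 * k + 1 := by omega
    have h2 : w.length / 2 = k := by omega
    have hklt : k < w.length := by omega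
    rw [h2, pal_count_odd w k hp hm hklt x]
    split_ifs <;> omega

theorem oddCnt_le_one_of_pal (u w : List Char) (hw : w.Perm u) (hp : w.reverse = w) :
    oddCnt u ≤ 1 := by
  have hto : u.toFinset = w.toFinset := (List.toFinset_eq_of_perm _ _ hw).symm
  have hcnt : ∀ x, u.count x = w.count x := fun x => (hw.count_eq x).symm
  unfold oddCnt
  rw [hto]
  rcases Nat.even_or_odd w.length with ⟨k, hk⟩ | ⟨k, hk⟩
  · have hm : w.length = 2 * k := by omega
    have : ∀ x ∈ w.toFinset, u.count x % 2 = 0 := by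
      intro x _
      rw [hcnt x, pal_count_even w k hp hm x]
      omega
    rw [Finset.sum_congr rfl this]
    simp
  · have hm : w.length = 2 * k + 1 := by omega
    have hklt : k < w.length := by omega
    have : ∀ x ∈ w.toFinset, u.count x % 2 = (if x = w[k] then 1 else 0) := by
      intro x _
      rw [hcnt x, pal_count_odd w k hp hm hklt x]
      split_ifs <;> omega
    rw [Finset.sum_congr rfl this, Finset.sum_ite_eq' w.toFinset (w[k]) (fun _ => 1)]
    split_ifs <;> omega

theorem count_flatMap_replicate (d : List Char) (hd : d.Nodup) (f : Char → ℕ) (y : Char) :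
    (d.flatMap (fun x => List.replicate (f x) x)).count y = if y ∈ d then f y else 0 := by
  induction d with
  | nil => simp
  | cons a d ih =>
    rw [List.nodup_cons] at hd
    rw [List.flatMap_cons, List.count_append, List.count_replicate, ih hd.2]
    by_cases hya : y = a
    · subst hya
      simp [hd.1]
    · have h2 : a ≠ y := fun h => hya h.symm
      simp [h2, hya]

theorem count_halfList (u : List Char) (y : Char) :
    (halfList u).count y = u.count y / 2 := by
  unfold halfList
  rw [count_flatMap_replicate _ (List.nodup_dedup u) _ y]
  by_cases hy : y ∈ u
  · simp [List.mem_dedup, hy]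
  · have : u.count y = 0 := List.count_eq_zero.mpr hy
    simp [List.mem_dedup, hy, this]

theorem length_halfList (u : List Char) : (halfList u).length = halfLen u := by
  unfold halfList halfLen
  rw [List.length_flatMap]
  have h1 : (u.dedup.map (fun x => (List.replicate (u.count x / 2) x).length)).sum
      = (u.dedup.map (fun x => u.count x / 2)).sum := by
    congr 1
    exact List.map_congr_left (fun x _ => by simp)
  rw [h1, ← List.sum_toFinset _ (List.nodup_dedup u)]
  congr 1
  ext x
  simp [List.mem_dedup]

theorem mem_midList (u : List Char) (x : Char) :
    x ∈ midList u ↔ x ∈ u ∧ u.count x % 2 = 1 := by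
  unfold midList
  simp [List.mem_filter, List.mem_dedup]

theorem count_midList (u : List Char) (x : Char) :
    (midList u).count x = u.count x % 2 := by
  have hnd : (midList u).Nodup := (List.nodup_dedup u).filter _
  rw [hnd.count]
  by_cases hm : x ∈ midList u
  · have := (mem_midList u x).mp hm
    simp [hm, this.2.symm]
  · rw [if_neg hm]
    rw [mem_midList] at hm
    by_cases hx : x ∈ u
    · have : ¬ u.count x % 2 = 1 := fun h => hm ⟨hx, h⟩
      omega
    · have : u.count x = 0 := List.count_eq_zero.mpr hx
      simp [this]

theorem length_midList (u : List Char) : (midList u).length = oddCnt u := by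
  rw [← List.sum_toFinset_count_eq_length (midList u)]
  unfold oddCnt
  have hsub : (midList u).toFinset ⊆ u.toFinset := by
    intro x hx
    rw [List.mem_toFinset] at *
    exact ((mem_midList u x).mp hx).1
  rw [Finset.sum_congr rfl (fun x _ => count_midList u x)]
  refine Finset.sum_subset hsub ?_
  intro x hxu hxm
  rw [List.mem_toFinset] at hxu hxm
  rw [mem_midList] at hxm
  have : ¬ u.count x % 2 = 1 := fun h => hxm ⟨hxu, h⟩
  omega

theorem len_eq_two_halfLen_add_oddCnt (u : List Char) :
    u.length = 2 * halfLen u + oddCnt u := by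
  unfold halfLen oddCnt
  rw [← List.sum_toFinset_count_eq_length u, Finset.mul_sum, ← Finset.sum_add_distrib]
  exact Finset.sum_congr rfl (fun x _ => by omega)

theorem permsFinset_decomp (u : List Char) (hu : u ≠ []) :
    u.permutations.toFinset =
      u.toFinset.biUnion (fun c => (u.erase c).permutations.toFinset.image (c :: ·)) := by
  ext w
  simp only [List.mem_toFinset, List.mem_permutations, Finset.mem_biUnion, Finset.mem_image]
  constructor
  · intro hw
    cases w with
    | nil =>
      exact absurd (hw.symm.eq_nil) hu
    | cons c t =>
      obtain ⟨hc, ht⟩ := List.cons_perm_iff_perm_erase.mp hw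
      exact ⟨c, hc, t, ht, rfl⟩
  · rintro ⟨c, hc, t, ht, rfl⟩
    exact List.cons_perm_iff_perm_erase.mpr ⟨hc, ht⟩

theorem nPerm_rec (u : List Char) (hu : u ≠ []) :
    nPerm u = ∑ c ∈ u.toFinset, nPerm (u.erase c) := by
  unfold nPerm
  rw [permsFinset_decomp u hu, Finset.card_biUnion]
  · refine Finset.sum_congr rfl (fun c _ => ?_)
    exact Finset.card_image_of_injective _ (fun a b h => (List.cons.injEq _ _ _ _).mp h |>.2)
  · intro c _ c' _ hne
    simp only [Function.onFun]
    rw [Finset.disjoint_left]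
    intro w hw hw'
    simp only [Finset.mem_image] at hw hw'
    obtain ⟨t, _, rfl⟩ := hw
    obtain ⟨t', _, h⟩ := hw'
    exact hne ((List.cons.injEq _ _ _ _).mp h |>.1).symm

theorem perm_count_mul :
    ∀ (n : ℕ) (u : List Char), u.length = n →
      (∏ x ∈ u.toFinset, (u.count x).factorial) * nPerm u = n.factorial := by
  intro n
  induction n with
  | zero =>
    intro u hl
    have : u = [] := List.length_eq_zero_iff.mp hl
    subst this
    simp [nPerm, List.permutations_nil]
  | succ n ih =>
    intro u hl
    have hu : u ≠ [] := by intro h; subst h; simp at hl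
    rw [nPerm_rec u hu, Finset.mul_sum]
    have hterm : ∀ c ∈ u.toFinset,
        (∏ x ∈ u.toFinset, (u.count x).factorial) * nPerm (u.erase c)
          = u.count c * n.factorial := by
      intro c hc
      have hcu : c ∈ u := List.mem_toFinset.mp hc
      have hpos : 0 < u.count c := List.count_pos_iff.mpr hcu
      -- factor the product at c
      have hprod : (∏ x ∈ u.toFinset, (u.count x).factorial)
          = u.count c * ∏ x ∈ u.toFinset, ((u.erase c).count x).factorial := by
        rw [← Finset.mul_prod_erase _ _ hc, ← Finset.mul_prod_erase _ (fun x => ((u.erase c).count x).factorial) hc]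
        have h1 : ∀ x ∈ u.toFinset.erase c,
            (u.count x).factorial = ((u.erase c).count x).factorial := by
          intro x hx
          rw [List.count_erase_of_ne (Finset.mem_erase.mp hx).1]
        rw [Finset.prod_congr rfl h1, List.count_erase_self,
          ← Nat.mul_factorial_pred (Nat.pos_iff_ne_zero.mp hpos), mul_assoc]
      have hsub : (∏ x ∈ u.toFinset, ((u.erase c).count x).factorial)
          = ∏ x ∈ (u.erase c).toFinset, ((u.erase c).count x).factorial := by
        refine (Finset.prod_subset ?_ ?_).symm
        · intro x hx
          exact List.mem_toFinset.mpr (List.mem_of_mem_erase (List.mem_toFinset.mp hx))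
        · intro x _ hx
          have : (u.erase c).count x = 0 :=
            List.count_eq_zero.mpr (fun h => hx (List.mem_toFinset.mpr h))
          simp [this]
      have hlen : (u.erase c).length = n := by
        rw [List.length_erase_of_mem hcu, hl]
        omega
      rw [hprod, hsub, mul_assoc]
      rw [ih (u.erase c) hlen]
    rw [Finset.sum_congr rfl hterm, ← Finset.sum_mul, List.sum_toFinset_count_eq_length, hl]
    rw [Nat.factorial_succ]

theorem palF_card_of_odd (u : List Char) (hu : ¬ oddCnt u ≤ 1) : (palF u).card = 0 := by
  rw [Finset.card_eq_zero]
  rw [Finset.eq_empty_iff_forall_notMem]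
  intro w hw
  simp only [palF, List.mem_toFinset, List.mem_filter, List.mem_permutations,
    decide_eq_true_eq] at hw
  exact hu (oddCnt_le_one_of_pal u w hw.1 hw.2)

theorem mem_palF (u w : List Char) : w ∈ palF u ↔ w.Perm u ∧ w.reverse = w := by
  simp [palF, List.mem_permutations]

theorem midList_reverse (u : List Char) (h : (midList u).length ≤ 1) :
    (midList u).reverse = midList u := by
  match hm : midList u with
  | [] => rfl
  | [a] => rfl
  | a :: b :: t => rw [hm] at h; simp at h

theorem palF_card_of_le_one (u : List Char) (hu : oddCnt u ≤ 1) :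
    (palF u).card = nPerm (halfList u) := by
  unfold nPerm
  refine Finset.card_bij' (fun w _ => w.take (w.length / 2))
    (fun h _ => h ++ (midList u ++ h.reverse)) ?_ ?_ ?_ ?_
  · -- take half is a permutation of halfList
    intro w hw
    obtain ⟨hperm, hpal⟩ := (mem_palF u w).mp hw
    rw [List.mem_toFinset, List.mem_permutations, List.perm_iff_count]
    intro x
    rw [pal_count_take_half w hpal x, count_halfList u x, hperm.count_eq x]
  · -- glue is a palindromic permutation of u
    intro h hh
    rw [List.mem_toFinset, List.mem_permutations] at hh
    have hcnt : ∀ x, h.count x = u.count x / 2 := by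
      intro x
      rw [hh.count_eq x, count_halfList u x]
    refine (mem_palF u _).mpr ⟨?_, ?_⟩
    · rw [List.perm_iff_count]
      intro x
      rw [List.count_append, List.count_append, List.count_reverse, hcnt x,
        count_midList u x]
      omega
    · rw [List.reverse_append, List.reverse_append, List.reverse_reverse,
        midList_reverse u (by rw [length_midList]; exact hu), List.append_assoc]
  · -- j ∘ i = id on palindromic permutations
    intro w hw
    dsimp only
    obtain ⟨hperm, hpal⟩ := (mem_palF u w).mp hw
    have hlen : w.length = u.length := hperm.length_eq
    rcases Nat.even_or_odd w.length with ⟨k, hk⟩ | ⟨k, hk⟩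
    · have hm2 : w.length = 2 * k := by omega
      have hmid : midList u = [] := by
        have h0 : oddCnt u = 0 := by
          have := len_eq_two_halfLen_add_oddCnt u
          rw [← hlen, hm2] at this
          omega
        have := length_midList u
        rw [h0] at this
        exact List.length_eq_zero_iff.mp this
      have hhalf : w.length / 2 = k := by omega
      rw [hmid, hhalf]
      simp only [List.nil_append]
      exact (pal_decomp_even w k hpal hm2).symm
    · have hm2 : w.length = 2 * k + 1 := by omega
      have hklt : k < w.length := by omega
      have hhalf : w.length / 2 = k := by omega
      have hodd1 : u.count (w[k]) % 2 = 1 := by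
        have := pal_count_odd w k hpal hm2 hklt (w[k])
        rw [hperm.count_eq (w[k])] at this
        simp at this
        omega
      have hWk : w[k] ∈ u := by
        rw [← List.count_pos_iff]
        omega
      have hmem : w[k] ∈ midList u := (mem_midList u _).mpr ⟨hWk, hodd1⟩
      have hmid : midList u = [w[k]] := by
        have hle : (midList u).length ≤ 1 := by rw [length_midList]; exact hu
        match hm : midList u with
        | [] => rw [hm] at hmem; simp at hmem
        | [a] =>
          rw [hm] at hmem
          simp at hmem
          rw [hmem]
        | a :: b :: t => rw [hm] at hle; simp at hle
      rw [hmid, hhalf]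
      have := pal_decomp_odd w k hpal hm2 hklt
      conv_rhs => rw [this]
      simp
  · -- i ∘ j = id on permutations of halfList
    intro h hh
    dsimp only
    rw [List.mem_toFinset, List.mem_permutations] at hh
    have hlenh : h.length = halfLen u := by
      rw [hh.length_eq, length_halfList]
    have hlen : (h ++ (midList u ++ h.reverse)).length = 2 * halfLen u + oddCnt u := by
      simp [length_midList, hlenh]
      omega
    have hhalf : (h ++ (midList u ++ h.reverse)).length / 2 = h.length := by
      rw [hlen, hlenh]
      omega
    rw [hhalf, List.take_left]

theorem a_fold_eq_flatMap (L : List Char) :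
    (List.range L.length).foldl (fun acc i =>
      (PySem.List.permutations (L.eraseIdx i) (L.eraseIdx i).length).foldl
        (fun acc2 j => if j.reverse = j then acc2 ++ [j] else acc2) acc) [] =
    (List.range L.length).flatMap (fun i =>
      (PySem.List.permutations (L.eraseIdx i) (L.eraseIdx i).length).filter
        (fun j => decide (j.reverse = j))) := by
  have h1 : (fun (acc : List (List Char)) i =>
      (PySem.List.permutations (L.eraseIdx i) (L.eraseIdx i).length).foldl
        (fun acc2 j => if j.reverse = j then acc2 ++ [j] else acc2) acc) =
      (fun acc i => acc ++ (PySem.List.permutations (L.eraseIdx i) (L.eraseIdx i).length).filter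
        (fun j => decide (j.reverse = j))) := by
    funext acc i
    exact PySem.List.foldl_append_ite_eq_filter _ _ _
  rw [h1, PySem.List.foldl_append_eq_flatMap, List.nil_append]

theorem dedup_fold_length (xs : List (List Char)) :
    (xs.foldl (fun u x => if x ∈ u then u else u ++ [x]) []).length = xs.toFinset.card := by
  have h1 : (fun (u : List (List Char)) x => if x ∈ u then u else u ++ [x]) = PySem.Set.add := by
    funext u x
    exact (PySem.Set.add_eq_ite u x).symm
  rw [h1, ← PySem.Set.ofList_eq_foldl]
  have h2 : (PySem.Set.ofList xs).toFinset = xs.toFinset := by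
    ext w
    simp [PySem.Set.mem_ofList]
  rw [← h2, List.toFinset_card_of_nodup (PySem.Set.nodup_ofList xs)]

theorem a_toFinset_eq_biUnion (L : List Char) :
    ((List.range L.length).flatMap (fun i =>
      (PySem.List.permutations (L.eraseIdx i) (L.eraseIdx i).length).filter
        (fun j => decide (j.reverse = j)))).toFinset =
    L.toFinset.biUnion (fun c => palF (L.erase c)) := by
  ext w
  simp only [List.mem_toFinset, List.mem_flatMap, List.mem_filter, List.mem_range,
    Finset.mem_biUnion, mem_permutations_iff, decide_eq_true_eq]
  constructor
  · rintro ⟨i, hi, hperm, hpal⟩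
    refine ⟨L[i], List.getElem_mem hi, ?_⟩
    rw [mem_palF]
    exact ⟨hperm.trans (List.Perm.symm (List.erase_getElem hi)), hpal⟩
  · rintro ⟨c, hc, hw⟩
    rw [mem_palF] at hw
    have hcu : c ∈ L := hc
    refine ⟨L.idxOf c, List.idxOf_lt_length_of_mem hcu, ?_, hw.2⟩
    rw [← List.erase_eq_eraseIdx_of_idxOf rfl]
    exact hw.1

theorem a_count_eq_sum (L : List Char) :
    (L.toFinset.biUnion (fun c => palF (L.erase c))).card =
      ∑ c ∈ L.toFinset, (palF (L.erase c)).card := by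
  refine Finset.card_biUnion ?_
  intro c hc c' hc' hne
  simp only [Function.onFun]
  rw [Finset.disjoint_left]
  intro w hw hw'
  rw [mem_palF] at hw hw'
  have h1 := hw.1.count_eq c
  have h2 := hw'.1.count_eq c
  rw [List.count_erase_self] at h1
  rw [List.count_erase_of_ne hne] at h2
  have hpos : 0 < L.count c := List.count_pos_iff.mpr (by simpa using hc)
  omega

theorem factB_natCast : ∀ (k : ℕ), factB (k : Int) = (k.factorial : Int) := by
  intro k
  induction k with
  | zero => rfl
  | succ k ih =>
    unfold factB
    by_cases hk : k = 0
    · subst hk; rfl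
    · have h2 : (2 : Int) ≤ (k : Int) + 1 := by omega
      rw [show (((k + 1 : ℕ) : Int) + 1) = ((k : Int) + 1) + 1 by push_cast; ring]
      rw [PySem.List.pyRange_one_succ_right h2, List.foldl_append]
      unfold factB at ih
      rw [show ((k : Int) + 1) = ((k + 1 : ℕ) : Int) by push_cast; ring] at *
      rw [ih]
      simp [Nat.factorial_succ]
      ring

theorem foldl_mul_eq_prod (l : List (Char × Int)) (f : Char × Int → Int) :
    ∀ (a : Int), l.foldl (fun d x => d * f x) a = a * (l.map f).prod := by
  induction l with
  | nil => intro a; simp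
  | cons x l ih =>
    intro a
    rw [List.foldl_cons, ih, List.map_cons, List.prod_cons, mul_assoc]

theorem mod2_natCast (m : ℕ) : PySem.Int.mod (m : Int) 2 = ((m % 2 : ℕ) : Int) := by
  rw [PySem.Int.mod_eq_emod_of_pos (by norm_num)]
  push_cast
  rfl

theorem floordiv2_natCast (m : ℕ) : PySem.Int.floordiv (m : Int) 2 = ((m / 2 : ℕ) : Int) := by
  rw [PySem.Int.floordiv_eq_ediv_of_pos (by norm_num)]
  push_cast
  rfl

-- factorial product over the full alphabet of L equals the one over u's support

theorem per_c (L : List Char) (c : Char) (hc : c ∈ L) :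
    (if (((PySem.Dict.counter L).items.map (fun kv => (kv.1, if kv.1 = c then kv.2 - 1 else kv.2))).foldl
          (fun (p : Int × Int) kv => (p.1 + PySem.Int.mod kv.2 2, p.2 + PySem.Int.floordiv kv.2 2)) (0, 0)).1 ≤ 1
      then PySem.Int.floordiv
          (factB (((PySem.Dict.counter L).items.map (fun kv => (kv.1, if kv.1 = c then kv.2 - 1 else kv.2))).foldl
            (fun (p : Int × Int) kv => (p.1 + PySem.Int.mod kv.2 2, p.2 + PySem.Int.floordiv kv.2 2)) (0, 0)).2)
          (((PySem.Dict.counter L).items.map (fun kv => (kv.1, if kv.1 = c then kv.2 - 1 else kv.2))).foldl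
            (fun d kv => d * factB (PySem.Int.floordiv kv.2 2)) 1)
      else 0)
    = (if oddCnt (L.erase c) ≤ 1 then (nPerm (halfList (L.erase c)) : Int) else 0) := by
  have hrem : ((PySem.Dict.counter L).items.map (fun kv => (kv.1, if kv.1 = c then kv.2 - 1 else kv.2)))
      = (PySem.Set.ofList L).map (fun k => (k, ((L.erase c).count k : Int))) := by
    rw [PySem.Dict.items_counter, List.map_map]
    refine List.map_congr_left ?_
    intro k _
    simp only [Function.comp]
    by_cases hk : k = c
    · subst hk
      have hpos : 0 < L.count k := List.count_pos_iff.mpr hc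
      rw [if_pos rfl, List.count_erase_self]
      congr 1
      omega
    · rw [if_neg hk, List.count_erase_of_ne hk]
  rw [hrem]
  set u := L.erase c with hu
  -- split the two-accumulator fold
  rw [PySem.List.foldl_prod_mk (f := fun a (e : Char × Int) => a + PySem.Int.mod e.2 2)
    (g := fun b (e : Char × Int) => b + PySem.Int.floordiv e.2 2)]
  rw [PySem.List.foldl_add, PySem.List.foldl_add, foldl_mul_eq_prod]
  simp only [List.map_map, Function.comp_def, zero_add, one_mul]
  -- the three list aggregates as Nat casts
  have hsub : u.toFinset ⊆ L.toFinset := by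
    intro x hx
    rw [List.mem_toFinset] at *
    exact List.mem_of_mem_erase hx
  have hzero : ∀ x ∈ L.toFinset, x ∉ u.toFinset → u.count x = 0 := by
    intro x _ hx
    exact List.count_eq_zero.mpr (fun h => hx (List.mem_toFinset.mpr h))
  have hmods : ((PySem.Set.ofList L).map (fun k => PySem.Int.mod ((u.count k : Int)) 2)).sum
      = (oddCnt u : Int) := by
    have h1 : ((PySem.Set.ofList L).map (fun k => PySem.Int.mod ((u.count k : Int)) 2))
        = (PySem.Set.ofList L).map (fun k => ((u.count k % 2 : ℕ) : Int)) := by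
      refine List.map_congr_left (fun k _ => mod2_natCast _)
    rw [h1]
    rw [← List.sum_toFinset _ (PySem.Set.nodup_ofList L)]
    have h2 : (PySem.Set.ofList L).toFinset = L.toFinset := by
      ext x; simp [PySem.Set.mem_ofList]
    rw [h2]
    rw [← Nat.cast_sum]
    congr 1
    unfold oddCnt
    refine (Finset.sum_subset hsub ?_).symm
    intro x hx hxn
    rw [hzero x hx hxn]
    rfl
  have hdivs : ((PySem.Set.ofList L).map (fun k => PySem.Int.floordiv ((u.count k : Int)) 2)).sum
      = (halfLen u : Int) := by
    have h1 : ((PySem.Set.ofList L).map (fun k => PySem.Int.floordiv ((u.count k : Int)) 2))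
        = (PySem.Set.ofList L).map (fun k => ((u.count k / 2 : ℕ) : Int)) := by
      refine List.map_congr_left (fun k _ => floordiv2_natCast _)
    rw [h1, ← List.sum_toFinset _ (PySem.Set.nodup_ofList L)]
    have h2 : (PySem.Set.ofList L).toFinset = L.toFinset := by
      ext x; simp [PySem.Set.mem_ofList]
    rw [h2, ← Nat.cast_sum]
    congr 1
    unfold halfLen
    refine (Finset.sum_subset hsub ?_).symm
    intro x hx hxn
    rw [hzero x hx hxn]
    rfl
  have hden : ((PySem.Set.ofList L).map (fun k => factB (PySem.Int.floordiv ((u.count k : Int)) 2))).prod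
      = ((∏ x ∈ u.toFinset, (u.count x / 2).factorial : ℕ) : Int) := by
    have h1 : ((PySem.Set.ofList L).map (fun k => factB (PySem.Int.floordiv ((u.count k : Int)) 2)))
        = (PySem.Set.ofList L).map (fun k => (((u.count k / 2).factorial : ℕ) : Int)) := by
      refine List.map_congr_left (fun k _ => ?_)
      rw [floordiv2_natCast, factB_natCast]
    rw [h1, ← List.prod_toFinset _ (PySem.Set.nodup_ofList L)]
    have h2 : (PySem.Set.ofList L).toFinset = L.toFinset := by
      ext x; simp [PySem.Set.mem_ofList]
    rw [h2, ← Nat.cast_prod]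
    congr 1
    refine (Finset.prod_subset hsub ?_).symm
    intro x hx hxn
    rw [hzero x hx hxn]
    rfl
  rw [hmods, hdivs, hden]
  have hcond : ((oddCnt u : Int) ≤ 1) ↔ oddCnt u ≤ 1 := by exact_mod_cast Iff.rfl
  by_cases h : oddCnt u ≤ 1
  · rw [if_pos (hcond.mpr h), if_pos h]
    rw [factB_natCast]
    -- (halfLen u)! = D * nPerm (halfList u)
    have hkey : (halfLen u).factorial
        = (∏ x ∈ u.toFinset, (u.count x / 2).factorial) * nPerm (halfList u) := by
      have h1 := perm_count_mul (halfList u).length (halfList u) rfl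
      rw [length_halfList] at h1
      rw [← h1]
      congr 1
      have hsub2 : (halfList u).toFinset ⊆ u.toFinset := by
        intro x hx
        rw [List.mem_toFinset] at *
        have : 0 < (halfList u).count x := List.count_pos_iff.mpr hx
        rw [count_halfList] at this
        have : 0 < u.count x := by omega
        exact List.count_pos_iff.mp this
      refine Eq.symm ?_
      calc ∏ x ∈ u.toFinset, (u.count x / 2).factorial
          = ∏ x ∈ u.toFinset, ((halfList u).count x).factorial := by
            refine Finset.prod_congr rfl (fun x _ => ?_)
            rw [count_halfList]
        _ = ∏ x ∈ (halfList u).toFinset, ((halfList u).count x).factorial := by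
            refine (Finset.prod_subset hsub2 ?_).symm
            intro x _ hxn
            have h0 : (halfList u).count x = 0 :=
              List.count_eq_zero.mpr (fun hmem => hxn (List.mem_toFinset.mpr hmem))
            rw [h0]
            rfl
    have hDpos : 0 < (∏ x ∈ u.toFinset, (u.count x / 2).factorial) :=
      Finset.prod_pos (fun x _ => Nat.factorial_pos _)
    rw [hkey]
    rw [PySem.Int.floordiv_eq_ediv_of_pos (by exact_mod_cast hDpos)]
    push_cast
    rw [Int.mul_ediv_cancel_left _ (by exact_mod_cast Nat.pos_iff_ne_zero.mp hDpos)]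
  · rw [if_neg (fun hx => h (hcond.mp hx)), if_neg h]

theorem b_body_eq (L : List Char) :
    queryAltBody L = ∑ c ∈ L.toFinset,
      (if oddCnt (L.erase c) ≤ 1 then (nPerm (halfList (L.erase c)) : Int) else 0) := by
  show (PySem.Dict.counter L).keys.foldl (fun total c =>
    if (((PySem.Dict.counter L).items.map (fun kv => (kv.1, if kv.1 = c then kv.2 - 1 else kv.2))).foldl
          (fun (p : Int × Int) kv => (p.1 + PySem.Int.mod kv.2 2, p.2 + PySem.Int.floordiv kv.2 2)) (0, 0)).1 ≤ 1
    then total + PySem.Int.floordiv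
          (factB ((((PySem.Dict.counter L).items.map (fun kv => (kv.1, if kv.1 = c then kv.2 - 1 else kv.2))).foldl
            (fun (p : Int × Int) kv => (p.1 + PySem.Int.mod kv.2 2, p.2 + PySem.Int.floordiv kv.2 2)) (0, 0)).2))
          (((PySem.Dict.counter L).items.map (fun kv => (kv.1, if kv.1 = c then kv.2 - 1 else kv.2))).foldl
            (fun d kv => d * factB (PySem.Int.floordiv kv.2 2)) 1)
    else total) 0 = _
  have hfun : (fun (total : Int) c =>
      if (((PySem.Dict.counter L).items.map (fun kv => (kv.1, if kv.1 = c then kv.2 - 1 else kv.2))).foldl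
            (fun (p : Int × Int) kv => (p.1 + PySem.Int.mod kv.2 2, p.2 + PySem.Int.floordiv kv.2 2)) (0, 0)).1 ≤ 1
      then total + PySem.Int.floordiv
            (factB ((((PySem.Dict.counter L).items.map (fun kv => (kv.1, if kv.1 = c then kv.2 - 1 else kv.2))).foldl
              (fun (p : Int × Int) kv => (p.1 + PySem.Int.mod kv.2 2, p.2 + PySem.Int.floordiv kv.2 2)) (0, 0)).2))
            (((PySem.Dict.counter L).items.map (fun kv => (kv.1, if kv.1 = c then kv.2 - 1 else kv.2))).foldl
              (fun d kv => d * factB (PySem.Int.floordiv kv.2 2)) 1)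
      else total)
    = (fun total c => total +
      (if (((PySem.Dict.counter L).items.map (fun kv => (kv.1, if kv.1 = c then kv.2 - 1 else kv.2))).foldl
            (fun (p : Int × Int) kv => (p.1 + PySem.Int.mod kv.2 2, p.2 + PySem.Int.floordiv kv.2 2)) (0, 0)).1 ≤ 1
      then PySem.Int.floordiv
            (factB ((((PySem.Dict.counter L).items.map (fun kv => (kv.1, if kv.1 = c then kv.2 - 1 else kv.2))).foldl
              (fun (p : Int × Int) kv => (p.1 + PySem.Int.mod kv.2 2, p.2 + PySem.Int.floordiv kv.2 2)) (0, 0)).2))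
            (((PySem.Dict.counter L).items.map (fun kv => (kv.1, if kv.1 = c then kv.2 - 1 else kv.2))).foldl
              (fun d kv => d * factB (PySem.Int.floordiv kv.2 2)) 1)
      else 0)) := by
    funext total c
    split_ifs with h
    · rfl
    · rw [add_zero]
  rw [hfun, PySem.List.foldl_add, zero_add, PySem.Dict.keys_counter]
  have hmap : ((PySem.Set.ofList L).map (fun c =>
      (if (((PySem.Dict.counter L).items.map (fun kv => (kv.1, if kv.1 = c then kv.2 - 1 else kv.2))).foldl
            (fun (p : Int × Int) kv => (p.1 + PySem.Int.mod kv.2 2, p.2 + PySem.Int.floordiv kv.2 2)) (0, 0)).1 ≤ 1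
      then PySem.Int.floordiv
            (factB ((((PySem.Dict.counter L).items.map (fun kv => (kv.1, if kv.1 = c then kv.2 - 1 else kv.2))).foldl
              (fun (p : Int × Int) kv => (p.1 + PySem.Int.mod kv.2 2, p.2 + PySem.Int.floordiv kv.2 2)) (0, 0)).2))
            (((PySem.Dict.counter L).items.map (fun kv => (kv.1, if kv.1 = c then kv.2 - 1 else kv.2))).foldl
              (fun d kv => d * factB (PySem.Int.floordiv kv.2 2)) 1)
      else 0)))
      = ((PySem.Set.ofList L).map (fun c =>
          if oddCnt (L.erase c) ≤ 1 then (nPerm (halfList (L.erase c)) : Int) else 0)) := by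
    refine List.map_congr_left (fun c hcmem => ?_)
    exact per_c L c ((PySem.Set.mem_ofList L c).mp hcmem)
  rw [hmap, ← List.sum_toFinset _ (PySem.Set.nodup_ofList L)]
  congr 1
  ext x
  simp [PySem.Set.mem_ofList]

theorem a_body_eq (L : List Char) :
    queryBody L = ∑ c ∈ L.toFinset, ((palF (L.erase c)).card : Int) := by
  show (((((List.range L.length).foldl (fun acc i =>
      (PySem.List.permutations (L.eraseIdx i) (L.eraseIdx i).length).foldl
        (fun acc2 j => if j.reverse = j then acc2 ++ [j] else acc2) acc) []).foldl
      (fun u x => if x ∈ u then u else u ++ [x]) []).length : Int)) = _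
  rw [a_fold_eq_flatMap, dedup_fold_length, a_toFinset_eq_biUnion, a_count_eq_sum]
  push_cast
  rfl

theorem body_eq (L : List Char) : queryBody L = queryAltBody L := by
  rw [a_body_eq, b_body_eq]
  refine Finset.sum_congr rfl (fun c _ => ?_)
  by_cases h : oddCnt (L.erase c) ≤ 1
  · rw [palF_card_of_le_one _ h, if_pos h]
  · rw [palF_card_of_odd _ h, if_neg h]
    rfl

-- ===== VERDICT (by name: the statement is the Claim_ definition above) =====
theorem query_spec : Claim_equal_query := by
  intro s l r _
  unfold Spec_query query query_alt
  exact body_eq _
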